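-- pv_equiv track=rewrite | github.com/SjulsonLab/irig_unix_timecodes | irig_h_gpio.py | find_timecode_starts
-- ===== SOURCE A (Python) =====
-- from typing import Generator, List, Optional, Tuple, Literal
--
-- def find_timecode_starts(binary_list) -> List[int]:
--     """
--     Finds all the indexes in the measured list of booleans for where a timecode starts.
--     Keep in mind that this assumes that there is NO noise.
--     If there is an incomplete timecode at the end, it will still return a start for that timecode.
--     Works with both lists and generators.
--     """
--
--     binary_iter = iter(binary_list)
--     try:
--         first_bit = next(binary_iter)
--     except StopIteration:
--         return []
--
--     starts = [0] if first_bit else [] # list of indexes for when the timecodes start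
--     flips = 1 if first_bit else 0     # if its already recieving timcodes at the start, change starting behavior
--
--     prev_bit = first_bit
--     i = 1
--
--     for current_bit in binary_iter:
--         if current_bit != prev_bit:
--             flips += 1
--             if (flips - 1) % 120 == 0:
--                 starts.append(i)
--         prev_bit = current_bit
--         i += 1
--     return starts
-- ===== SOURCE B (Python) =====
-- from typing import List
--
-- def find_timecode_starts(binary_list) -> List[int]:
--     """Collect every transition index in one pass, then keep every 120th entry."""
--     binary_iter = iter(binary_list)
--     try:
--         prev = next(binary_iter)
--     except StopIteration:
--         return []
--     flip_positions = [0] if prev else []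
--     for i, bit in enumerate(binary_iter, start=1):
--         if bit != prev:
--             flip_positions.append(i)
--             prev = bit
--     return [pos for j, pos in enumerate(flip_positions) if j % 120 == 0]
-- ===== Notes on version B (the rewrite author's own statement) =====
-- stated objective: simpler
-- what changed: Instead of A's inline modular flip counter that decides during the scan which indices to emit, B collects the list of all transition indices (with a virtual transition at 0 if the first bit is set) in one pass and then keeps every 120th entry in a separate selection step.
import Mathlib
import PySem

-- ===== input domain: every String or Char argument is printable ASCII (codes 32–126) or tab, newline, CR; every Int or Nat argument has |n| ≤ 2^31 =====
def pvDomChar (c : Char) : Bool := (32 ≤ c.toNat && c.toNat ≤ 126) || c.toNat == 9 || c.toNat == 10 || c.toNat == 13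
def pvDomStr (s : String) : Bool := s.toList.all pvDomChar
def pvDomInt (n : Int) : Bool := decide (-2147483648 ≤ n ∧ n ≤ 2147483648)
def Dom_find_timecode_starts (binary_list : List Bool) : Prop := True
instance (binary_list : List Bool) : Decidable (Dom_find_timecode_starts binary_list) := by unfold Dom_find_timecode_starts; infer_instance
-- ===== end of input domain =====

-- B keeps the list of all transition indices and then keeps every 120th of them,
-- instead of A's inline modular flip counter; objective: simpler decomposition.

-- ===== PORT A =====
-- loop body of A: state (starts, flips, prev_bit, i)
def ftsStepA (st : List Int × Int × Bool × Int) (current_bit : Bool) : List Int × Int × Bool × Int :=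
  let (starts, flips, prev_bit, i) := st
  if current_bit != prev_bit then
    let flips := flips + 1
    let starts := if PySem.Int.mod (flips - 1) 120 == 0 then starts ++ [i] else starts
    (starts, flips, current_bit, i + 1)
  else
    (starts, flips, prev_bit, i + 1)

def find_timecode_starts (binary_list : List Bool) : List Int :=
  match binary_list with
  | [] => []
  | first_bit :: rest =>
    let starts : List Int := if first_bit then [0] else []
    let flips : Int := if first_bit then 1 else 0
    (rest.foldl ftsStepA (starts, flips, first_bit, 1)).1

-- ===== PORT B =====
-- loop body of B: state (flip_positions, prev, i)
def ftsStepB (st : List Int × Bool × Int) (bit : Bool) : List Int × Bool × Int :=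
  let (flip_positions, prev, i) := st
  if bit != prev then (flip_positions ++ [i], bit, i + 1)
  else (flip_positions, prev, i + 1)

-- [pos for j, pos in enumerate(flip_positions) if j % 120 == 0]
def ftsEvery120 (flip_positions : List Int) : List Int :=
  (PySem.List.enumerate flip_positions 0).filterMap
    (fun p => if PySem.Int.mod p.1 120 == 0 then some p.2 else none)

def find_timecode_starts_alt (binary_list : List Bool) : List Int :=
  match binary_list with
  | [] => []
  | first :: rest =>
    let flip_positions : List Int := if first then [0] else []
    ftsEvery120 (rest.foldl ftsStepB (flip_positions, first, 1)).1

-- ===== PRECONDITION & SPEC =====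
def Spec_find_timecode_starts (binary_list : List Bool) (out : List Int) : Prop := out = find_timecode_starts_alt binary_list
instance (binary_list : List Bool) (out : List Int) : Decidable (Spec_find_timecode_starts binary_list out) := by unfold Spec_find_timecode_starts; infer_instance

-- ===== CLAIM (what is proved, stated in full; the proofs are below) =====
def Claim_equal_find_timecode_starts : Prop := ∀ (binary_list : List Bool), Dom_find_timecode_starts binary_list → Spec_find_timecode_starts binary_list (find_timecode_starts binary_list)

-- ===== LEMMAS AND PROOFS =====

-- Python '% 120' on a nonnegative length is Nat mod
theorem ftsMod120_eq (n : Nat) : PySem.Int.mod (n : Int) 120 = ((n % 120 : Nat) : Int) := by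
  simpa using PySem.Int.mod_natCast n 120

-- selecting every-120th commutes with appending one element
theorem ftsEvery120_append (fs : List Int) (x : Int) :
    ftsEvery120 (fs ++ [x])
      = ftsEvery120 fs ++ (if fs.length % 120 = 0 then [x] else []) := by
  unfold ftsEvery120
  rw [PySem.List.enumerate_append, List.filterMap_append]
  congr 1
  simp only [PySem.List.enumerate_cons, PySem.List.enumerate_nil,
    List.filterMap_cons, List.filterMap_nil]
  rw [show ((0 : Int) + (fs.length : Int)) = ((fs.length : Nat) : Int) by ring, ftsMod120_eq]
  by_cases h : fs.length % 120 = 0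
  · simp [h]
  · simp only [h, beq_iff_eq, Nat.cast_eq_zero]
    rfl

-- loop invariant: A's (starts, flips) are (every-120th of fs, length of fs) for B's fs
theorem fts_loop_inv (l : List Bool) (fs : List Int) (prev : Bool) (i : Int) :
    (l.foldl ftsStepA (ftsEvery120 fs, (fs.length : Int), prev, i)).1
      = ftsEvery120 (l.foldl ftsStepB (fs, prev, i)).1 := by
  induction l generalizing fs prev i with
  | nil => rfl
  | cons b l ih =>
    simp only [List.foldl_cons, ftsStepA, ftsStepB]
    by_cases hb : (b != prev) = true
    · rw [if_pos hb, if_pos hb]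
      have hsel : (if PySem.Int.mod ((fs.length : Int) + 1 - 1) 120 == 0
            then ftsEvery120 fs ++ [i] else ftsEvery120 fs)
          = ftsEvery120 (fs ++ [i]) := by
        rw [ftsEvery120_append,
            show ((fs.length : Int) + 1 - 1) = ((fs.length : Nat) : Int) by ring, ftsMod120_eq]
        by_cases h : fs.length % 120 = 0
        · simp [h]
        · simp only [h, beq_iff_eq, Nat.cast_eq_zero]
          simp
      have hlen : ((fs.length : Int) + 1) = (((fs ++ [i]).length : Nat) : Int) := by
        simp
      rw [hsel, hlen, ih]
    · rw [if_neg hb, if_neg hb]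
      exact ih fs prev (i + 1)

-- ===== VERDICT (by name: the statement is the Claim_ definition above) =====
theorem find_timecode_starts_spec : Claim_equal_find_timecode_starts := by
  intro binary_list _
  unfold Spec_find_timecode_starts
  match binary_list with
  | [] => rfl
  | first :: rest =>
    simp only [find_timecode_starts, find_timecode_starts_alt]
    cases first
    · have h0 : ftsEvery120 ([] : List Int) = [] := by decide
      have := fts_loop_inv rest [] false 1
      rw [h0] at this
      simpa using this
    · have h1 : ftsEvery120 ([0] : List Int) = [0] := by decide
      have := fts_loop_inv rest [0] true 1
      rw [h1] at this
      simpa using this
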